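-- pv_equiv track=rewrite | github.com/kimdahee7/CodingTest_Python | 백준/Silver/2108. 통계학/통계학.py | modefinder
-- ===== SOURCE A (Python) =====
-- from collections import Counter
--
-- def modefinder(list):
--     c = Counter(list)
--     order = c.most_common()
--     maximum = order[0][1]
--
--     modes = []
--     for num in order:
--         if num[1] == maximum:
--             modes.append(num[0])
--     modes.sort()
--     return modes
-- ===== SOURCE B (Python) =====
-- def modefinder(list):
--     s = sorted(list)
--     # one pass over the sorted copy, grouping maximal runs of equal adjacent elements
--     runs = []
--     for x in s:
--         if runs and runs[-1][0] == x:
--             runs[-1] = (x, runs[-1][1] + 1)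
--         else:
--             runs.append((x, 1))
--     best = max(c for _, c in runs)
--     # s is sorted, so the run values already come out in ascending order
--     return [v for v, c in runs if c == best]
-- ===== Notes on version B (the rewrite author's own statement) =====
-- stated objective: alternative
-- what changed: Replaces Counter + most_common + filter + final sort by a single pass over a sorted copy that groups maximal runs of equal adjacent elements, then keeps the values of maximum run length (already in ascending order).
import Mathlib
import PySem

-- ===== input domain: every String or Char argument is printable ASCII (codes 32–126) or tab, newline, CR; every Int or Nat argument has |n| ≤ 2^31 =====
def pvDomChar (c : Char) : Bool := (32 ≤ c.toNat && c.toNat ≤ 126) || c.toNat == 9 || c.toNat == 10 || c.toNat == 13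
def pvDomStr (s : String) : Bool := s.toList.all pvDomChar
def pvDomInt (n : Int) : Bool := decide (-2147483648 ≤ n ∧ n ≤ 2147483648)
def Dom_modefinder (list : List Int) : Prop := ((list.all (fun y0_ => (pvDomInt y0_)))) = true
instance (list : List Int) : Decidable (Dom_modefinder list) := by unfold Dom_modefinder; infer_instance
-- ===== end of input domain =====

-- B replaces Counter + most_common by sort-then-group-runs (a different decomposition, similar cost);
-- equal return values proved on all nonempty inputs (neither version mutates its argument).

-- ===== PORT A =====
def modefinder (list : List Int) : List Int :=
  let c := PySem.Dict.counter list
  -- Counter.most_common() = sorted(items, key=itemgetter(1), reverse=True)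
  let order := PySem.List.sorted c.items (fun p => p.2) true
  match PySem.List.pyGet? order 0 with
  | none => []   -- order[0] raises IndexError on empty input; excluded by Pre_
  | some top =>
    let maximum := top.2
    let modes := order.foldl (fun acc num => if num.2 == maximum then acc ++ [num.1] else acc) []
    PySem.List.sorted modes (fun x => x) false

-- ===== PORT B =====
-- loop body of 'for x in s: …' (merge x into the last run or start a new one)
def runStep (runs : List (Int × Int)) (x : Int) : List (Int × Int) :=
  match runs.getLast? with
  | some (v, c) => if v = x then runs.dropLast ++ [(x, c + 1)] else runs ++ [(x, 1)]
  | none => runs ++ [(x, 1)]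

def modefinder_alt (list : List Int) : List Int :=
  let s := PySem.List.sorted list (fun x => x) false
  let runs := s.foldl runStep []
  match PySem.List.max? (runs.map (fun p => p.2)) (fun c => c) with
  | none => []   -- max() raises ValueError on the empty generator; excluded by Pre_
  | some best => (runs.filter (fun p => p.2 == best)).map (fun p => p.1)

-- ===== PRECONDITION & SPEC =====
-- On the empty list A raises IndexError (order[0]) — and B raises ValueError (max of nothing); excluded.
def Pre_modefinder (list : List Int) : Prop := list ≠ []
instance (list : List Int) : Decidable (Pre_modefinder list) := by unfold Pre_modefinder; infer_instance
def pvWitness_modefinder : List Int := [1, 2, 2]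

def Spec_modefinder (list : List Int) (out : List Int) : Prop := out = modefinder_alt list
instance (list : List Int) (out : List Int) : Decidable (Spec_modefinder list out) := by unfold Spec_modefinder; infer_instance

-- ===== CLAIM (what is proved, stated in full; the proofs are below) =====
def Claim_equal_modefinder : Prop := ∀ (list : List Int), Dom_modefinder list → Pre_modefinder list → Spec_modefinder list (modefinder list)

-- ===== LEMMAS AND PROOFS =====

-- proof-only recursive description of the run-grouping fold
def runsAux : List Int → List (Int × Int)
  | [] => []
  | x :: xs => match runsAux xs with
    | (v, c) :: t => if v = x then (x, c + 1) :: t else (x, 1) :: (v, c) :: t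
    | [] => [(x, 1)]

def mergeRun (v : Int) (c : Int) : List (Int × Int) → List (Int × Int)
  | (v', c') :: t => if v' = v then (v, c + c') :: t else (v, c) :: (v', c') :: t
  | [] => [(v, c)]

theorem runStep_single (v c x : Int) :
    runStep [(v, c)] x = if v = x then [(x, c + 1)] else [(v, c), (x, 1)] := by
  simp [runStep]

theorem runStep_concat (rs : List (Int × Int)) (v : Int) (c : Int) (x : Int) :
    runStep (rs ++ [(v, c)]) x = rs ++ runStep [(v, c)] x := by
  simp [runStep]
  split_ifs <;> simp

theorem foldl_runStep_concat (xs : List Int) : ∀ (rs : List (Int × Int)) (v c : Int),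
    xs.foldl runStep (rs ++ [(v, c)]) = rs ++ xs.foldl runStep [(v, c)] := by
  induction xs with
  | nil => intro rs v c; simp
  | cons x xs ih =>
    intro rs v c
    simp only [List.foldl_cons]
    rw [runStep_concat, runStep_single]
    by_cases h : v = x
    · rw [if_pos h, ih rs x (c + 1)]
    · rw [if_neg h,
        show rs ++ [(v, c), (x, 1)] = (rs ++ [(v, c)]) ++ [(x, 1)] by simp,
        ih (rs ++ [(v, c)]) x 1,
        show ([(v, c), (x, 1)] : List (Int × Int)) = [(v, c)] ++ [(x, 1)] from rfl,
        ih [(v, c)] x 1, List.append_assoc]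

theorem foldl_runStep_eq_mergeRun (xs : List Int) : ∀ (v : Int) (c : Int),
    xs.foldl runStep [(v, c)] = mergeRun v c (runsAux xs) := by
  induction xs with
  | nil => intro v c; rfl
  | cons x xs ih =>
    intro v c
    simp only [List.foldl_cons, runStep_single]
    by_cases h : v = x
    · rw [if_pos h, ih x (c + 1)]
      subst h
      cases hr : runsAux xs with
      | nil => simp [runsAux, hr, mergeRun]
      | cons p t =>
        obtain ⟨w, d⟩ := p
        by_cases hw : w = v
        · subst hw
          simp [runsAux, hr, mergeRun]
          omega
        · simp [runsAux, hr, mergeRun, hw]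
    · have h' : x ≠ v := Ne.symm h
      rw [if_neg h,
        show ([(v, c), (x, 1)] : List (Int × Int)) = [(v, c)] ++ [(x, 1)] from rfl,
        foldl_runStep_concat, ih x 1]
      cases hr : runsAux xs with
      | nil => simp [runsAux, hr, mergeRun, h']
      | cons p t =>
        obtain ⟨w, d⟩ := p
        by_cases hw : w = x
        · subst hw
          simp [runsAux, hr, mergeRun, h']
          omega
        · simp [runsAux, hr, mergeRun, hw, h']

theorem foldl_runStep_eq_runsAux (s : List Int) : s.foldl runStep [] = runsAux s := by
  cases s with
  | nil => rfl
  | cons x xs =>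
    have h0 : runStep [] x = [(x, 1)] := rfl
    rw [List.foldl_cons, h0, foldl_runStep_eq_mergeRun]
    cases hr : runsAux xs with
    | nil => simp [runsAux, hr, mergeRun]
    | cons p t =>
      obtain ⟨w, d⟩ := p
      by_cases hw : w = x
      · subst hw
        simp [runsAux, hr, mergeRun]
        omega
      · simp [runsAux, hr, mergeRun, hw]

theorem runsAux_spec (s : List Int) (hs : s.Pairwise (· ≤ ·)) :
    ((runsAux s).map Prod.fst).Pairwise (· < ·)
    ∧ (∀ v, v ∈ (runsAux s).map Prod.fst ↔ v ∈ s)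
    ∧ (∀ p ∈ runsAux s, p.2 = (s.count p.1 : Int)) := by
  induction s with
  | nil => simp [runsAux]
  | cons x xs ih =>
    rw [List.pairwise_cons] at hs
    obtain ⟨hx, hxs⟩ := hs
    obtain ⟨p1, p2, p3⟩ := ih hxs
    cases hr : runsAux xs with
    | nil =>
      have hxs0 : xs = [] := by
        apply List.eq_nil_iff_forall_not_mem.mpr
        intro v hv
        have := (p2 v).mpr hv
        rw [hr] at this
        simp at this
      subst hxs0
      simp [runsAux]
    | cons p t =>
      obtain ⟨w, d⟩ := p
      rw [hr] at p1 p2 p3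
      have hwxs : w ∈ xs := (p2 w).mp (by simp)
      have hxw : x ≤ w := hx w hwxs
      have hwt : ∀ u ∈ t.map Prod.fst, w < u := by
        simpa [List.pairwise_cons] using fun u hu => (List.pairwise_cons.mp p1).1 u hu
      by_cases hwx : w = x
      · subst hwx
        have hres : runsAux (w :: xs) = (w, d + 1) :: t := by simp [runsAux, hr]
        rw [hres]
        refine ⟨?_, ?_, ?_⟩
        · simpa using p1
        · intro v
          constructor
          · intro hv
            rcases (List.mem_cons).mp hv with h | h
            · simp [h]
            · exact List.mem_cons_of_mem _ ((p2 v).mp (List.mem_cons_of_mem _ h))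
          · intro hv
            rcases (List.mem_cons).mp hv with h | h
            · simp [h]
            · have := (p2 v).mpr h
              simpa using this
        · intro q hq
          rcases (List.mem_cons).mp hq with h | h
          · subst h
            have hd : d = (xs.count w : Int) := p3 (w, d) (by simp)
            simp [hd]
          · have hq1 : q.1 ∈ t.map Prod.fst := List.mem_map_of_mem h
            have : w < q.1 := hwt _ hq1
            have hne : q.1 ≠ w := by omega
            have hc := p3 q (List.mem_cons_of_mem _ h)
            simp [Ne.symm hne, hc]
      · -- x < everything recorded for xs
        have hxlt : ∀ u ∈ (w, d) :: t, x < u.1 := by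
          intro u hu
          rcases (List.mem_cons).mp hu with h | h
          · subst h; omega
          · have : w < u.1 := hwt _ (List.mem_map_of_mem h)
            omega
        have hxnot : x ∉ xs := by
          intro hmem
          have := (p2 x).mpr hmem
          rcases (List.mem_cons).mp this with h | h
          · exact hwx h.symm
          · rcases List.mem_map.mp h with ⟨q, hq, hq1⟩
            have : w < x := hq1 ▸ hwt _ (List.mem_map_of_mem hq)
            omega
        have hres : runsAux (x :: xs) = (x, 1) :: (w, d) :: t := by
          simp [runsAux, hr, hwx]
        rw [hres]
        refine ⟨?_, ?_, ?_⟩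
        · rw [List.map_cons, List.pairwise_cons]
          exact ⟨fun u hu => by
            rcases List.mem_map.mp hu with ⟨q, hq, hq1⟩
            exact hq1 ▸ hxlt q hq, p1⟩
        · intro v
          simp only [List.map_cons, List.mem_cons] at p2 ⊢
          rw [← p2 v]
        · intro q hq
          rcases (List.mem_cons).mp hq with h | h
          · subst h
            simp [List.count_eq_zero_of_not_mem hxnot]
          · have hne : q.1 ≠ x := by have := hxlt q h; omega
            have hc := p3 q h
            simp [Ne.symm hne, hc]

-- membership in B's result
theorem mem_alt_result (runs : List (Int × Int)) (best : Int) (v : Int) :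
    v ∈ (runs.filter (fun p => p.2 == best)).map (fun p => p.1) ↔
      ∃ p ∈ runs, p.2 = best ∧ p.1 = v := by
  simp only [List.mem_map, List.mem_filter, beq_iff_eq]
  constructor
  · rintro ⟨p, ⟨hp, hb⟩, hv⟩; exact ⟨p, hp, hb, hv⟩
  · rintro ⟨p, hp, hb, hv⟩; exact ⟨p, ⟨hp, hb⟩, hv⟩

-- ===== VERDICT (by name: the statement is the Claim_ definition above) =====
theorem modefinder_spec : Claim_equal_modefinder := by
  unfold Claim_equal_modefinder
  intro list _ hne
  unfold Spec_modefinder modefinder modefinder_alt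
  simp only []
  -- names for the A side
  set items := (PySem.Dict.counter list).items with hitems_def
  have hitems : items = (PySem.Set.ofList list : List Int).map (fun k => (k, (list.count k : Int))) :=
    PySem.Dict.items_counter list
  set order := PySem.List.sorted items (fun p => p.2) true with horder_def
  have horder_perm : order.Perm items := PySem.List.sorted_perm items (fun p => p.2) true
  have hitems_ne : items ≠ [] := by
    intro h
    rw [hitems] at h
    cases hl : list with
    | nil => exact hne hl
    | cons a l =>
      have : a ∈ (PySem.Set.ofList list : List Int) := (PySem.Set.mem_ofList list a).mpr (by rw [hl]; simp)
      rw [List.map_eq_nil_iff.mp h] at this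
      simp at this
  have horder_ne : order ≠ [] := by
    intro h
    exact hitems_ne ((PySem.List.sorted_eq_nil_iff items (fun p => p.2) true).mp h)
  obtain ⟨top, rest, hcons⟩ := List.exists_cons_of_ne_nil horder_ne
  rw [hcons]
  simp only [show PySem.List.pyGet? (top :: rest) 0 = some top by simp [pysem]]
  -- names for the B side
  set s := PySem.List.sorted list (fun x => x) false with hs_def
  have hs_pair : s.Pairwise (· ≤ ·) := PySem.List.sorted_pairwise list (fun x => x)
  have hs_perm : s.Perm list := PySem.List.sorted_perm list (fun x => x) false
  have hruns : s.foldl runStep [] = runsAux s := foldl_runStep_eq_runsAux s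
  rw [hruns]
  obtain ⟨q1, q2, q3⟩ := runsAux_spec s hs_pair
  have hcount : ∀ v : Int, s.count v = list.count v := fun v => hs_perm.count_eq v
  have hs_ne : s ≠ [] := by
    intro h
    exact hne ((PySem.List.sorted_eq_nil_iff list (fun x => x) false).mp h)
  have hruns_ne : runsAux s ≠ [] := by
    intro h
    obtain ⟨a, l, hl⟩ := List.exists_cons_of_ne_nil hs_ne
    have : a ∈ List.map Prod.fst (runsAux s) := (q2 a).mpr (by rw [hl]; simp)
    rw [h] at this; simp at this
  have hmax_ne : PySem.List.max? ((runsAux s).map (fun p => p.2)) (fun c => c) ≠ none := by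
    intro h
    have := (PySem.List.max?_eq_none_iff _ _).mp h
    exact hruns_ne (List.map_eq_nil_iff.mp this)
  obtain ⟨best, hbest⟩ := Option.ne_none_iff_exists'.mp hmax_ne
  rw [hbest]
  -- facts about maximum and best
  have htop_mem : top ∈ items := horder_perm.mem_iff.mp (by rw [hcons]; simp)
  have hmax_ge : ∀ p ∈ items, p.2 ≤ top.2 :=
    PySem.List.key_head_sorted_rev_ge items (fun p => p.2) hcons
  have hbest_max : ∀ p ∈ runsAux s, p.2 ≤ best := fun p hp =>
    PySem.List.max?_isMax hbest p.2 (List.mem_map_of_mem hp)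
  have hbest_mem : ∃ p ∈ runsAux s, p.2 = best := by
    obtain ⟨p, hp, hpb⟩ := List.mem_map.mp (PySem.List.max?_mem hbest)
    exact ⟨p, hp, hpb⟩
  -- each run is (value, count) with value ∈ list
  have hrun_val : ∀ p ∈ runsAux s, p.1 ∈ list ∧ p.2 = (list.count p.1 : Int) := by
    intro p hp
    refine ⟨hs_perm.mem_iff.mp ((q2 p.1).mp (List.mem_map_of_mem hp)), ?_⟩
    rw [q3 p hp, hcount]
  -- each item is (key, count) with key ∈ list
  have hitem_val : ∀ p ∈ items, p.1 ∈ list ∧ p.2 = (list.count p.1 : Int) := by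
    intro p hp
    rw [hitems] at hp
    obtain ⟨k, hk, hkp⟩ := List.mem_map.mp hp
    subst hkp
    exact ⟨(PySem.Set.mem_ofList list k).mp hk, rfl⟩
  have hval_item : ∀ v ∈ list, (v, (list.count v : Int)) ∈ items := by
    intro v hv
    rw [hitems]
    exact List.mem_map_of_mem ((PySem.Set.mem_ofList list v).mpr hv)
  have hval_run : ∀ v ∈ list, ∃ p ∈ runsAux s, p.1 = v ∧ p.2 = (list.count v : Int) := by
    intro v hv
    obtain ⟨p, hp, hpv⟩ := List.mem_map.mp ((q2 v).mpr (hs_perm.mem_iff.mpr hv))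
    exact ⟨p, hp, hpv, by rw [← hpv, q3 p hp, hcount]⟩
  -- maximum = best
  have hmb : top.2 = best := by
    obtain ⟨k, hk⟩ := hitem_val top htop_mem
    obtain ⟨p, hp, hp1, hp2⟩ := hval_run top.1 k
    obtain ⟨q, hq, hqb⟩ := hbest_mem
    obtain ⟨hq1, hq2⟩ := hrun_val q hq
    have h1 : top.2 ≤ best := by
      have := hbest_max p hp
      omega
    have h2 : best ≤ top.2 := by
      have := hmax_ge (q.1, (list.count q.1 : Int)) (hval_item q.1 hq1)
      simp only at this
      omega
    omega
  -- A's modes list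
  rw [PySem.List.foldl_append_if (fun num => num.2 == top.2) (fun num => num.1) (top :: rest) []]
  rw [← hcons, List.nil_append]
  -- B's result
  set ys := ((runsAux s).filter (fun p => p.2 == best)).map (fun p => p.1) with hys_def
  have hys_pair : ys.Pairwise (· < ·) :=
    q1.sublist (List.Sublist.map Prod.fst List.filter_sublist)
  apply PySem.List.sorted_eq_of_perm_of_pairwise_lt _ ys (fun x => x) ?_ hys_pair
  -- the permutation: both are nodup lists with the same members
  have hys_nodup : ys.Nodup := hys_pair.imp (fun h => ne_of_lt h)
  have hmodes_nodup : (((order.filter (fun num => num.2 == top.2)).map (fun num => num.1)) :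
      List Int).Nodup := by
    have hperm : ((order.filter (fun num => num.2 == top.2)).map (fun num => num.1)).Perm
        ((items.filter (fun num => num.2 == top.2)).map (fun num => num.1)) :=
      (horder_perm.filter _).map _
    apply hperm.nodup_iff.mpr
    have hsub : ((items.filter (fun num => num.2 == top.2)).map (fun num => num.1)).Sublist
        (items.map (fun num => num.1)) := List.Sublist.map _ List.filter_sublist
    have hnod : (items.map (fun num => num.1)).Nodup := by
      rw [hitems, List.map_map]
      have h0 : (List.map ((fun num => num.1) ∘ fun k => (k, (list.count k : Int)))
          (PySem.Set.ofList list)) = (PySem.Set.ofList list : List Int) := List.map_id _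
      rw [h0]
      exact PySem.Set.nodup_ofList list
    exact hnod.sublist hsub
  rw [List.perm_ext_iff_of_nodup hys_nodup hmodes_nodup]
  intro v
  rw [hys_def, mem_alt_result, mem_alt_result]
  constructor
  · rintro ⟨p, hp, hpb, hpv⟩
    obtain ⟨hv, hc⟩ := hrun_val p hp
    subst hpv
    refine ⟨(p.1, (list.count p.1 : Int)), ?_⟩
    refine ⟨horder_perm.mem_iff.mpr (hval_item p.1 hv), by simp [← hc, hpb, hmb], rfl⟩
  · rintro ⟨p, hp, hpm, hpv⟩
    obtain ⟨hv, hc⟩ := hitem_val p (horder_perm.mem_iff.mp hp)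
    obtain ⟨q, hq, hq1, hq2⟩ := hval_run p.1 hv
    subst hpv
    exact ⟨q, hq, by omega, hq1⟩
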